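-- pv_equiv track=rewrite | github.com/danielbom/codewars | Python/6 - kyu/6 kyu - Remember.py | remember
-- ===== SOURCE A (Python) =====
-- def remember(text):
--     counter = {}
--     result = []
--     for ch in text:
--         counter[ch] = counter.get(ch, 0) + 1
--         if counter[ch] == 2:
--             result.append(ch)
--     return result
-- ===== SOURCE B (Python) =====
-- def remember(text):
--     pairs = []
--     for ch in set(text):
--         idxs = [i for i, c in enumerate(text) if c == ch]
--         if len(idxs) >= 2:
--             pairs.append((idxs[1], ch))
--     pairs.sort(key=lambda p: p[0])
--     return [ch for _, ch in pairs]
-- ===== Notes on version B (the rewrite author's own statement) =====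
-- stated objective: alternative
-- what changed: Instead of A's single left-to-right pass with a running counter, B groups by distinct character, collects each character's occurrence positions, keeps the second position when it exists, and sorts the (position, char) pairs to recover the emission order.
import Mathlib
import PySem

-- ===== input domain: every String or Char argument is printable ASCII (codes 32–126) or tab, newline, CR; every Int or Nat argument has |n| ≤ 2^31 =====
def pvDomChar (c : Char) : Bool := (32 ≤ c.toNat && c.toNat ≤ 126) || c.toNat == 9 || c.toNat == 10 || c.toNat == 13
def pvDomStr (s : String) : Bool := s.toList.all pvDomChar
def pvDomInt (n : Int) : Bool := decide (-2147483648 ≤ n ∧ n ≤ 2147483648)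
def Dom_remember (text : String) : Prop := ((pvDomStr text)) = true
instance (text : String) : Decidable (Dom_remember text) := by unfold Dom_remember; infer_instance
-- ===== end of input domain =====

-- B replaces A's single pass with a running counter by a group-by-character strategy:
-- collect each distinct character's occurrence positions, keep the second one, sort by position.

-- ===== PORT A =====
-- for ch in text: counter[ch] = counter.get(ch,0) + 1; if counter[ch] == 2: result.append(ch)
def remember (text : String) : List String :=
  (text.toList.foldl
    (fun (p : PySem.Dict Char Int × List String) ch =>
      let counter := p.1.insert ch (p.1.getD ch 0 + 1)
      if counter.getD ch 0 == 2 then (counter, p.2 ++ [String.ofList [ch]])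
      else (counter, p.2))
    (PySem.Dict.empty, [])).2

-- ===== PORT B =====
-- for ch in set(text): idxs = [i for i,c in enumerate(text) if c == ch];
--   if len(idxs) >= 2: pairs.append((idxs[1], ch))
-- pairs.sort(key=lambda p: p[0]); return [ch for _, ch in pairs]
-- (idxs[1] is guarded by len(idxs) >= 2, so the defaulting pyGetD is exact there)
def remember_alt (text : String) : List String :=
  let l := text.toList
  let pairs := (PySem.Set.ofList l).foldl
    (fun (acc : List (Int × Char)) ch =>
      let idxs := (PySem.List.enumerate l 0).filterMap
        (fun p => if p.2 == ch then some p.1 else none)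
      if 2 ≤ idxs.length then acc ++ [(PySem.List.pyGetD idxs 1 0, ch)] else acc)
    []
  (PySem.List.sorted pairs (fun p => p.1)).map (fun p => String.ofList [p.2])

-- ===== PRECONDITION & SPEC =====
def Spec_remember (text : String) (out : List String) : Prop := out = remember_alt text
instance (text : String) (out : List String) : Decidable (Spec_remember text out) := by unfold Spec_remember; infer_instance

-- ===== CLAIM (what is proved, stated in full; the proofs are below) =====
def Claim_equal_remember : Prop := ∀ (text : String), Dom_remember text → Spec_remember text (remember text)

-- ===== LEMMAS AND PROOFS =====

-- A's loop body, zeta-reduced (definitionally equal to the lambda inside `remember`)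
def pvStep (p : PySem.Dict Char Int × List String) (ch : Char) : PySem.Dict Char Int × List String :=
  if (p.1.insert ch (p.1.getD ch 0 + 1)).getD ch 0 == 2 then
    (p.1.insert ch (p.1.getD ch 0 + 1), p.2 ++ [String.ofList [ch]])
  else (p.1.insert ch (p.1.getD ch 0 + 1), p.2)

-- spec of A: (index, char) pairs at which the char occurs for the second time, in text order
def pvTP (pre l : List Char) : List (Nat × Char) :=
  match l with
  | [] => []
  | c :: t => (if pre.count c == 1 then [(pre.length, c)] else []) ++ pvTP (pre ++ [c]) t

theorem pvA_eq (l : List Char) (d : PySem.Dict Char Int) (res : List String) (pre : List Char)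
    (h : ∀ c, d.getD c 0 = (pre.count c : Int)) :
    (l.foldl pvStep (d, res)).2 = res ++ (pvTP pre l).map (fun p => String.ofList [p.2]) := by
  induction l generalizing d res pre with
  | nil => simp [pvTP]
  | cons c t ih =>
    have hself : (d.insert c (d.getD c 0 + 1)).getD c 0 = (pre.count c : Int) + 1 := by
      rw [PySem.Dict.getD_insert_self, h]
    have hinv : ∀ c', (d.insert c (d.getD c 0 + 1)).getD c' 0 = ((pre ++ [c]).count c' : Int) := by
      intro c'
      rw [PySem.Dict.getD_insert]
      by_cases hc : c' = c
      · simp [hc, h, List.count_append]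
      · simp [hc, Ne.symm hc, h, List.count_append]
    rw [List.foldl_cons]
    by_cases hcnt : pre.count c = 1
    · have hc2 : ((pre.count c : Int) + 1 == 2) = true := by simp [hcnt]
      have hacc : pvStep (d, res) c = (d.insert c (d.getD c 0 + 1), res ++ [String.ofList [c]]) := by
        simp [pvStep, hself, hc2]
      rw [hacc, ih _ _ _ hinv]
      simp [pvTP, hcnt]
    · have hc2 : ((pre.count c : Int) + 1 == 2) = false := by
        simp only [beq_eq_false_iff_ne, ne_eq]
        omega
      have hacc : pvStep (d, res) c = (d.insert c (d.getD c 0 + 1), res) := by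
        simp [pvStep, hself, hc2]
      rw [hacc, ih _ _ _ hinv]
      simp [pvTP, hcnt]

-- occurrence positions of ch in l, ascending (spec of B's idxs comprehension)
def pvPos (l : List Char) (ch : Char) : List Nat :=
  match l with
  | [] => []
  | c :: t => (if c = ch then [0] else []) ++ (pvPos t ch).map (· + 1)

-- B's idxs comprehension, as Int-cast pvPos
def pvIdxsI (l : List Char) (ch : Char) : List Int := (pvPos l ch).map (fun (k : Nat) => (k : Int))

theorem pvIdxs_eq (l : List Char) (ch : Char) (n : Int) :
    (PySem.List.enumerate l n).filterMap (fun p => if p.2 == ch then some p.1 else none)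
      = (pvPos l ch).map (fun (k : Nat) => (k : Int) + n) := by
  induction l generalizing n with
  | nil => simp [PySem.List.enumerate_nil, pvPos]
  | cons c t ih =>
    have hshift : ((pvPos t ch).map (· + 1)).map (fun (k : Nat) => (k : Int) + n)
        = (pvPos t ch).map (fun (k : Nat) => (k : Int) + (n + 1)) := by
      rw [List.map_map]
      apply List.map_congr_left
      intro k _
      show ((k + 1 : Nat) : Int) + n = (k : Int) + (n + 1)
      push_cast
      ring
    rw [PySem.List.enumerate_cons]
    by_cases hc : c = ch
    · subst hc
      rw [show pvPos (c :: t) c = 0 :: (pvPos t c).map (· + 1) from by simp [pvPos],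
        List.map_cons, hshift, ← ih (n + 1)]
      simp [List.filterMap_cons]
    · rw [show pvPos (c :: t) ch = (pvPos t ch).map (· + 1) from by simp [pvPos, hc],
        hshift, ← ih (n + 1)]
      simp [List.filterMap_cons, hc]

theorem pvIdxs0 (l : List Char) (ch : Char) :
    (PySem.List.enumerate l 0).filterMap (fun p => if p.2 == ch then some p.1 else none)
      = pvIdxsI l ch := by
  rw [pvIdxs_eq, pvIdxsI]
  apply List.map_congr_left
  intro k _
  simp

theorem pvPos_length (l : List Char) (ch : Char) : (pvPos l ch).length = l.count ch := by
  induction l with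
  | nil => simp [pvPos]
  | cons c t ih =>
    by_cases hc : c = ch
    · subst hc
      simp [pvPos, ih, List.count_cons]
    · simp [pvPos, hc, ih, List.count_cons, Ne.symm hc]

-- (pvPos l ch)[j]? = some k  ↔  k is the (j+1)-th occurrence of ch
theorem pvPos_getElem? (l : List Char) (ch : Char) : ∀ (j k : Nat),
    (pvPos l ch)[j]? = some k ↔
      (k < l.length ∧ l[k]? = some ch ∧ (l.take k).count ch = j) := by
  induction l with
  | nil => intro j k; simp [pvPos]
  | cons c t ih =>
    intro j k
    by_cases hc : c = ch
    · subst hc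
      rw [show pvPos (c :: t) c = 0 :: (pvPos t c).map (· + 1) from by simp [pvPos]]
      cases j with
      | zero =>
        cases k with
        | zero => simp
        | succ m =>
          constructor
          · intro h
            simp at h
          · rintro ⟨h1, h2, h3⟩
            simp [List.count_cons] at h3
      | succ j' =>
        cases k with
        | zero =>
          constructor
          · intro h
            rw [List.getElem?_cons_succ, List.getElem?_map] at h
            rcases hm : (pvPos t c)[j']? with _ | m <;> rw [hm] at h <;> simp at h
          · rintro ⟨h1, h2, h3⟩
            simp at h3
        | succ m =>
          rw [List.getElem?_cons_succ, List.getElem?_map,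
            show ∀ o : Option Nat, o.map (· + 1) = some (m + 1) ↔ o = some m from by
              intro o; cases o <;> simp,
            ih j' m]
          simp [List.count_cons]
    · rw [show pvPos (c :: t) ch = (pvPos t ch).map (· + 1) from by simp [pvPos, hc]]
      cases k with
      | zero =>
        constructor
        · intro h
          rw [List.getElem?_map] at h
          rcases hm : (pvPos t ch)[j]? with _ | m <;> rw [hm] at h <;> simp at h
        · rintro ⟨h1, h2, h3⟩
          rw [List.getElem?_cons_zero] at h2
          simp at h2
          exact absurd h2 hc
      | succ m =>
        rw [List.getElem?_map,
          show ∀ o : Option Nat, o.map (· + 1) = some (m + 1) ↔ o = some m from by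
            intro o; cases o <;> simp,
          ih j m]
        simp [List.count_cons, hc]

-- membership in pvTP
theorem mem_pvTP (l : List Char) : ∀ (pre : List Char) (k : Nat) (c : Char),
    (k, c) ∈ pvTP pre l ↔
      ∃ j, j < l.length ∧ k = pre.length + j ∧ l[j]? = some c ∧ (pre ++ l.take j).count c = 1 := by
  induction l with
  | nil => intro pre k c; simp [pvTP]
  | cons c' t ih =>
    intro pre k c
    have hlen1 : (pre ++ [c']).length = pre.length + 1 := by simp
    simp only [pvTP]
    by_cases hcnt : pre.count c' = 1
    · have hcond : (pre.count c' == 1) = true := by simp [hcnt]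
      rw [if_pos hcond]
      simp only [List.singleton_append, List.mem_cons, ih, Prod.mk.injEq]
      constructor
      · rintro (⟨hk, hc⟩ | ⟨j, hj, hk, hg, hone⟩)
        · subst hc
          exact ⟨0, by simp, by omega, by simp, by simpa using hcnt⟩
        · refine ⟨j + 1, by simp only [List.length_cons]; omega, by omega,
            by simpa using hg, ?_⟩
          simpa [List.append_assoc] using hone
      · rintro ⟨j, hj, hk, hg, hone⟩
        cases j with
        | zero =>
          left
          simp at hg
          exact ⟨by omega, hg.symm⟩
        | succ j' =>
          right
          refine ⟨j', by simp only [List.length_cons] at hj; omega, by omega,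
            by simpa using hg, ?_⟩
          simpa [List.append_assoc] using hone
    · have hcond : ¬ ((pre.count c' == 1) = true) := by simp [hcnt]
      rw [if_neg hcond]
      simp only [List.nil_append, ih]
      constructor
      · rintro ⟨j, hj, hk, hg, hone⟩
        refine ⟨j + 1, by simp only [List.length_cons]; omega, by omega,
          by simpa using hg, ?_⟩
        simpa [List.append_assoc] using hone
      · rintro ⟨j, hj, hk, hg, hone⟩
        cases j with
        | zero =>
          exfalso
          simp at hg hone
          subst hg
          exact hcnt hone
        | succ j' =>
          refine ⟨j', by simp only [List.length_cons] at hj; omega, by omega,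
            by simpa using hg, ?_⟩
          simpa [List.append_assoc] using hone

theorem mem_pvTP_nil (l : List Char) (k : Nat) (c : Char) :
    (k, c) ∈ pvTP [] l ↔ (pvPos l c)[1]? = some k := by
  rw [mem_pvTP, pvPos_getElem?]
  constructor
  · rintro ⟨j, hj, hk, hg, hone⟩
    simp only [List.length_nil, Nat.zero_add] at hk
    subst hk
    exact ⟨hj, hg, by simpa using hone⟩
  · rintro ⟨h1, h2, h3⟩
    exact ⟨k, h1, by simp, h2, by simpa using h3⟩

theorem pvTP_fst_lt (l : List Char) : ∀ (pre : List Char),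
    (pvTP pre l).Pairwise (fun a b => a.1 < b.1) := by
  have hle : ∀ (l pre : List Char) (p : Nat × Char), p ∈ pvTP pre l → pre.length ≤ p.1 := by
    intro l
    induction l with
    | nil => intro pre p hp; simp [pvTP] at hp
    | cons c t ih =>
      intro pre p hp
      simp only [pvTP] at hp
      rcases List.mem_append.mp hp with h | h
      · split at h <;> simp at h
        cases h; simp
      · have := ih (pre ++ [c]) p h
        simp at this; omega
  induction l with
  | nil => intro pre; simp [pvTP]
  | cons c t ih =>
    intro pre
    simp only [pvTP]
    by_cases hcnt : pre.count c == 1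
    · rw [if_pos hcnt, List.singleton_append, List.pairwise_cons]
      refine ⟨?_, ih (pre ++ [c])⟩
      intro p hp
      have := hle t (pre ++ [c]) p hp
      simp at this ⊢; omega
    · rw [if_neg hcnt, List.nil_append]
      exact ih (pre ++ [c])

-- B's pairs list, normalized, and A's pair list cast to Int
def pvPairs (l : List Char) : List (Int × Char) :=
  ((PySem.Set.ofList l).filter (fun ch => decide (2 ≤ (pvIdxsI l ch).length))).map
    (fun ch => (PySem.List.pyGetD (pvIdxsI l ch) 1 0, ch))

def pvT (l : List Char) : List (Int × Char) :=
  (pvTP [] l).map (fun p => ((p.1 : Int), p.2))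

theorem pvGetSecond (l : List Char) (c : Char) (h1 : 1 < (pvPos l c).length) :
    PySem.List.pyGetD (pvIdxsI l c) 1 0 = (((pvPos l c)[1]'h1 : Nat) : Int) := by
  rw [pvIdxsI, PySem.List.pyGetD_ofNat', List.getD_eq_getElem?_getD, List.getElem?_map,
    List.getElem?_eq_getElem h1]
  simp

theorem pvFold_eq (l : List Char) :
    (PySem.Set.ofList l).foldl
      (fun (acc : List (Int × Char)) ch =>
        let idxs := (PySem.List.enumerate l 0).filterMap
          (fun p => if p.2 == ch then some p.1 else none)
        if 2 ≤ idxs.length then acc ++ [(PySem.List.pyGetD idxs 1 0, ch)] else acc)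
      [] = pvPairs l := by
  have hfun : (fun (acc : List (Int × Char)) ch =>
      let idxs := (PySem.List.enumerate l 0).filterMap
        (fun p => if p.2 == ch then some p.1 else none)
      if 2 ≤ idxs.length then acc ++ [(PySem.List.pyGetD idxs 1 0, ch)] else acc)
      = (fun (acc : List (Int × Char)) ch =>
        if (fun ch => decide (2 ≤ (pvIdxsI l ch).length)) ch = true
        then acc ++ [(fun ch => (PySem.List.pyGetD (pvIdxsI l ch) 1 0, ch)) ch]
        else acc) := by
    funext acc ch
    show (if 2 ≤ ((PySem.List.enumerate l 0).filterMap
          (fun p => if p.2 == ch then some p.1 else none)).length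
        then acc ++ [(PySem.List.pyGetD ((PySem.List.enumerate l 0).filterMap
          (fun p => if p.2 == ch then some p.1 else none)) 1 0, ch)]
        else acc) = _
    rw [pvIdxs0]
    simp
  rw [hfun, PySem.List.foldl_append_if]
  simp [pvPairs]

theorem mem_pvPairs (l : List Char) (ki : Int) (c : Char) :
    (ki, c) ∈ pvPairs l ↔ ∃ k : Nat, (pvPos l c)[1]? = some k ∧ ki = (k : Int) := by
  unfold pvPairs
  simp only [List.mem_map, List.mem_filter, Prod.mk.injEq]
  constructor
  · rintro ⟨d, ⟨hmem, hlen⟩, hfst, hsnd⟩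
    rw [hsnd] at hlen hfst
    simp only [pvIdxsI, List.length_map, decide_eq_true_eq] at hlen
    have h1 : 1 < (pvPos l c).length := by omega
    refine ⟨(pvPos l c)[1]'h1, List.getElem?_eq_getElem h1, ?_⟩
    rw [← hfst, pvGetSecond l c h1]
  · rintro ⟨k, hk, hki⟩
    obtain ⟨h1, heq⟩ := List.getElem?_eq_some_iff.mp hk
    have hcmem : c ∈ l := by
      rw [← List.count_pos_iff, ← pvPos_length]
      omega
    refine ⟨c, ⟨(PySem.Set.mem_ofList l c).mpr hcmem, ?_⟩, ?_, rfl⟩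
    · simp only [pvIdxsI, List.length_map, decide_eq_true_eq]
      omega
    · rw [pvGetSecond l c h1, heq, hki]
  
theorem mem_pvT (l : List Char) (ki : Int) (c : Char) :
    (ki, c) ∈ pvT l ↔ ∃ k : Nat, (pvPos l c)[1]? = some k ∧ ki = (k : Int) := by
  unfold pvT
  simp only [List.mem_map, Prod.mk.injEq]
  constructor
  · rintro ⟨⟨k, d⟩, hmem, hfst, hsnd⟩
    exact ⟨k, (mem_pvTP_nil l k c).mp (by rwa [show d = c from hsnd] at hmem), hfst.symm⟩
  · rintro ⟨k, hk, hki⟩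
    exact ⟨(k, c), (mem_pvTP_nil l k c).mpr hk, hki.symm, rfl⟩

theorem pvT_pairwise (l : List Char) : (pvT l).Pairwise (fun a b => a.1 < b.1) := by
  unfold pvT
  refine List.Pairwise.map _ ?_ (pvTP_fst_lt l [])
  intro a b hab
  simpa using hab

theorem pvSorted (l : List Char) :
    PySem.List.sorted (pvPairs l) (fun p => p.1) = pvT l := by
  have hTnodup : (pvT l).Nodup :=
    List.Pairwise.imp (fun h => by intro he; rw [he] at h; omega) (pvT_pairwise l)
  have hPnodup : (pvPairs l).Nodup := by
    unfold pvPairs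
    apply List.Nodup.map
    · intro a b hab
      simpa using congrArg Prod.snd hab
    · exact (PySem.Set.nodup_ofList l).filter _
  refine PySem.List.sorted_eq_of_perm_of_pairwise_lt _ _ _ ?_ (pvT_pairwise l)
  rw [List.perm_ext_iff_of_nodup hTnodup hPnodup]
  rintro ⟨ki, c⟩
  rw [mem_pvT, mem_pvPairs]

-- ===== VERDICT (by name: the statement is the Claim_ definition above) =====
theorem remember_spec : Claim_equal_remember := by
  intro text _
  show remember text = remember_alt text
  have hA : remember text = (text.toList.foldl pvStep (PySem.Dict.empty, [])).2 := rfl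
  have hB : remember_alt text = (PySem.List.sorted ((PySem.Set.ofList text.toList).foldl
      (fun (acc : List (Int × Char)) ch =>
        let idxs := (PySem.List.enumerate text.toList 0).filterMap
          (fun p => if p.2 == ch then some p.1 else none)
        if 2 ≤ idxs.length then acc ++ [(PySem.List.pyGetD idxs 1 0, ch)] else acc)
      []) (fun p => p.1)).map (fun p => String.ofList [p.2]) := rfl
  rw [hA, pvA_eq text.toList PySem.Dict.empty [] [] (by intro c; simp [PySem.Dict.getD_empty]),
    hB, pvFold_eq, pvSorted]
  unfold pvT
  rw [List.map_map]
  simp [Function.comp]
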